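-- pv_equiv track=rewrite | github.com/mw742/OUD-survival | prepare_intervals.py | _icd10_core
-- ===== SOURCE A (Python) =====
-- def _icd10_core(x: str) -> str:
--     if not isinstance(x, str): return ""
--     x = x.strip().upper()
--     out = []
--     for ch in x:
--         if (ch == 'F' and not out) or ch.isdigit() or ch == '.':
--             out.append(ch)
--         else:
--             break
--     return "".join(out)
-- ===== SOURCE B (Python) =====
-- import re
--
-- _ICD10_RE = re.compile(r'F?[0-9.]*')
--
-- def _icd10_core(x: str) -> str:
--     if not isinstance(x, str): return ""
--     x = x.strip().upper()
--     return _ICD10_RE.match(x).group(0)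
-- ===== Notes on version B (the rewrite author's own statement) =====
-- stated objective: idiomatic
-- what changed: Replaces the explicit accumulator loop with break by a single precompiled regular-expression match (optional leading F, then a run of digits and dots) whose whole-match group is the same prefix.
import Mathlib
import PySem

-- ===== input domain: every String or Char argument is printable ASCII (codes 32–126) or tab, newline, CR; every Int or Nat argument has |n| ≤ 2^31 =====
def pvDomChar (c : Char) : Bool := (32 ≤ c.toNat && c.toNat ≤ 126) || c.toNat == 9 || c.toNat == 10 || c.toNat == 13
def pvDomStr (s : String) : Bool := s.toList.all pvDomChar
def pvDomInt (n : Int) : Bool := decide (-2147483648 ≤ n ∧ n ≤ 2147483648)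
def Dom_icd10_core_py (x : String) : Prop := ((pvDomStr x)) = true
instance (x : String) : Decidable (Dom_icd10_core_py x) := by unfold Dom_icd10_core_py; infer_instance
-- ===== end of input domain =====

-- B replaces A's explicit accumulator loop (with break) by a regular-expression match
-- 'F?[0-9.]*'; equivalence of the two is proved on the return value.

-- ===== PORT A =====
-- the for-loop with break and accumulator `out`
def pvAgo (acc : List Char) : List Char → List Char
  | [] => acc
  | c :: cs =>
      if (c == 'F' && acc.isEmpty) || PySem.Chars.isdigit c || c == '.' then
        pvAgo (acc ++ [c]) cs
      else acc

def icd10_core_py (x : String) : String :=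
  let x' := PySem.Str.upper (PySem.Str.strip x)
  String.ofList (pvAgo [] x'.toList)

-- ===== PORT B =====
-- the character class [0-9.]
def pvDigitDot (c : Char) : Bool := PySem.Chars.isdigit c || c == '.'

-- the regex 'F?[0-9.]*' matched at the start: optional leading 'F', then a run of [0-9.]
def icd10_core_py_alt (x : String) : String :=
  let cs := (PySem.Str.upper (PySem.Str.strip x)).toList
  String.ofList (match cs with
    | 'F' :: rest => 'F' :: rest.takeWhile pvDigitDot
    | _ => cs.takeWhile pvDigitDot)

-- ===== PRECONDITION & SPEC =====
def Spec_icd10_core_py (x : String) (out : String) : Prop := out = icd10_core_py_alt x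
instance (x : String) (out : String) : Decidable (Spec_icd10_core_py x out) := by unfold Spec_icd10_core_py; infer_instance

-- ===== CLAIM (what is proved, stated in full; the proofs are below) =====
def Claim_equal_icd10_core_py : Prop := ∀ (x : String), Dom_icd10_core_py x → Spec_icd10_core_py x (icd10_core_py x)

-- ===== LEMMAS AND PROOFS =====

-- one step of the loop, as written
theorem pvAgo_cons (acc : List Char) (c : Char) (cs : List Char) :
    pvAgo acc (c :: cs) =
      if (c == 'F' && acc.isEmpty) || PySem.Chars.isdigit c || c == '.' then
        pvAgo (acc ++ [c]) cs
      else acc := rfl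

-- once `out` is nonempty, the loop condition is exactly pvDigitDot: the loop is takeWhile
theorem pvAgo_nonempty (cs : List Char) : ∀ acc : List Char, acc ≠ [] →
    pvAgo acc cs = acc ++ cs.takeWhile pvDigitDot := by
  induction cs with
  | nil => intro acc _; simp [pvAgo]
  | cons c cs ih =>
      intro acc hacc
      have he : acc.isEmpty = false := by simp [hacc]
      rw [pvAgo_cons, List.takeWhile_cons]
      by_cases hd : pvDigitDot c = true
      · have hc : ((c == 'F' && acc.isEmpty) || PySem.Chars.isdigit c || c == '.') = true := by
          simp [pvDigitDot] at hd
          rcases hd with h | h <;> simp [h]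
        rw [if_pos hc, hd, ih _ (by simp)]
        simp
      · simp only [Bool.not_eq_true] at hd
        have hd' := hd
        simp only [pvDigitDot, Bool.or_eq_false_iff, beq_eq_false_iff_ne] at hd'
        rw [if_neg (by simp [he, hd'.1, hd'.2]), hd]
        simp

theorem pvAgo_eq_alt (cs : List Char) :
    pvAgo [] cs = (match cs with
      | 'F' :: rest => 'F' :: rest.takeWhile pvDigitDot
      | _ => cs.takeWhile pvDigitDot) := by
  match cs with
  | [] => simp [pvAgo]
  | c :: rest =>
      by_cases hF : c = 'F'
      · subst hF
        show pvAgo [] ('F' :: rest) = 'F' :: rest.takeWhile pvDigitDot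
        have h1 : pvAgo [] ('F' :: rest) = pvAgo ['F'] rest := rfl
        rw [h1, pvAgo_nonempty rest ['F'] (by simp)]
        simp
      · have hA : pvAgo [] (c :: rest) = (c :: rest).takeWhile pvDigitDot := by
          rw [pvAgo_cons, List.takeWhile_cons]
          by_cases hd : pvDigitDot c = true
          · have hc : ((c == 'F' && ([] : List Char).isEmpty) || PySem.Chars.isdigit c || c == '.') = true := by
              simp [pvDigitDot] at hd
              rcases hd with h | h <;> simp [h]
            rw [if_pos hc, hd]
            simp only [List.nil_append]
            rw [pvAgo_nonempty rest [c] (by simp)]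
            simp
          · simp only [Bool.not_eq_true] at hd
            have hd' := hd
            simp only [pvDigitDot, Bool.or_eq_false_iff, beq_eq_false_iff_ne] at hd'
            rw [if_neg (by simp [hF, hd'.1, hd'.2]), hd]
            simp
        rw [hA]
        split
        · rename_i heq; injection heq with h1 _; exact absurd h1 hF
        · rfl

-- ===== VERDICT (by name: the statement is the Claim_ definition above) =====
theorem icd10_core_py_spec : Claim_equal_icd10_core_py := by
  intro x _
  unfold Spec_icd10_core_py icd10_core_py icd10_core_py_alt
  simp only [pvAgo_eq_alt]
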